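-- pv_equiv track=rewrite | github.com/dwssef/til | update_readme.py | readme_demend_data
-- ===== SOURCE A (Python) =====
-- def readme_demend_data(path_url):
--     readme_data = {}
--     for path, url in path_url:
--         key = path.split("/")[0]
--         md_url = f'[{path}]({url})'
--         if key in readme_data:
--             readme_data[key].append(md_url)
--         else:
--             readme_data[key] = [md_url]
--     return readme_data
-- ===== SOURCE B (Python) =====
-- def readme_demend_data(path_url):
--     pairs = [(p.split("/")[0], f'[{p}]({u})') for p, u in path_url]
--     keys = list(dict.fromkeys(k for k, _ in pairs))
--     return {k: [m for kk, m in pairs if kk == k] for k in keys}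
-- ===== Notes on version B (the rewrite author's own statement) =====
-- stated objective: alternative
-- what changed: Replaces the single-pass dict with membership-test/append by a two-phase decomposition: precompute all (key, md_url) pairs, dedup the keys in first-appearance order, then build the result with one comprehension per key that filters the pair list.
import Mathlib
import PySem

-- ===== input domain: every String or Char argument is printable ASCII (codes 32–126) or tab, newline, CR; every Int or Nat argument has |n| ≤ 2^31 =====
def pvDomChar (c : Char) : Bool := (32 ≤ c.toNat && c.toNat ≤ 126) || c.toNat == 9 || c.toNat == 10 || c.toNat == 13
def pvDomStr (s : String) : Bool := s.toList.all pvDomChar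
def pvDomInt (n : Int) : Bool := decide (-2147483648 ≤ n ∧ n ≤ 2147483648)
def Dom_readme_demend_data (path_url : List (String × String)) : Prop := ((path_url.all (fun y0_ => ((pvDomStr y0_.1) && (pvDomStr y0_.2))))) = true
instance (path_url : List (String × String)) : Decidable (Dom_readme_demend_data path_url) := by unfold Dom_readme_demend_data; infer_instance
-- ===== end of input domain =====

-- B regroups via precomputed (key, md_url) pairs, deduped keys and per-key filters instead of A's single dict-building pass; same result, no speed claim.

-- ===== PORT A =====
-- path.split("/")[0]: "/" is a nonempty separator so split returns at least one piece; headD "" is exact.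
def readme_demend_data (path_url : List (String × String)) : List (String × List String) :=
  (path_url.foldl (fun d pu =>
    let key := (((PySem.Str.split? pu.1 "/").getD [])).headD ""
    let md_url := "[" ++ pu.1 ++ "](" ++ pu.2 ++ ")"
    if d.contains key then d.modify key [] (fun v => v ++ [md_url])
    else d.insert key [md_url]) PySem.Dict.empty).items

-- ===== PORT B =====
def readme_demend_data_alt (path_url : List (String × String)) : List (String × List String) :=
  let pairs := path_url.map (fun pu =>
    ((((PySem.Str.split? pu.1 "/").getD [])).headD "", "[" ++ pu.1 ++ "](" ++ pu.2 ++ ")"))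
  let keys := PySem.List.dedup (pairs.map (fun q => q.1))
  keys.map (fun k => (k, (pairs.filter (fun q => q.1 == k)).map (fun q => q.2)))

-- ===== PRECONDITION & SPEC =====
def Spec_readme_demend_data (path_url : List (String × String)) (out : List (String × List String)) : Prop := out = readme_demend_data_alt path_url
instance (path_url : List (String × String)) (out : List (String × List String)) : Decidable (Spec_readme_demend_data path_url out) := by unfold Spec_readme_demend_data; infer_instance

-- ===== CLAIM (what is proved, stated in full; the proofs are below) =====
def Claim_equal_readme_demend_data : Prop := ∀ (path_url : List (String × String)), Dom_readme_demend_data path_url → Spec_readme_demend_data path_url (readme_demend_data path_url)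

-- ===== LEMMAS AND PROOFS =====

-- A's branch (append if present, fresh singleton otherwise) is exactly Dict.modify with default [].
theorem step_eq_modify (d : PySem.Dict String (List String)) (k md : String) :
    (if d.contains k then d.modify k [] (fun v => v ++ [md]) else d.insert k [md])
      = d.modify k [] (fun v => v ++ [md]) := by
  by_cases h : d.contains k = true
  · simp [h]
  · rw [Bool.not_eq_true] at h
    simp [h, PySem.Dict.modify, PySem.Dict.insert, PySem.Dict.getD_of_not_contains _ _ h]

theorem readme_demend_data_spec : Claim_equal_readme_demend_data := by
  intro path_url _
  unfold Spec_readme_demend_data readme_demend_data readme_demend_data_alt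
  set pairs := path_url.map (fun pu =>
    ((((PySem.Str.split? pu.1 "/").getD [])).headD "", "[" ++ pu.1 ++ "](" ++ pu.2 ++ ")")) with hpairs
  have hfold : path_url.foldl (fun d pu =>
      let key := (((PySem.Str.split? pu.1 "/").getD [])).headD ""
      let md_url := "[" ++ pu.1 ++ "](" ++ pu.2 ++ ")"
      if d.contains key then d.modify key [] (fun v => v ++ [md_url])
      else d.insert key [md_url]) PySem.Dict.empty
      = pairs.foldl (fun d q => d.modify q.1 [] (fun v => v ++ [q.2])) PySem.Dict.empty := by
    rw [hpairs, List.foldl_map]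
    apply PySem.List.foldl_congr_mem
    intro d pu _
    exact step_eq_modify d (((PySem.Str.split? pu.1 "/").getD []).headD "") ("[" ++ pu.1 ++ "](" ++ pu.2 ++ ")")
  rw [hfold]
  set D := pairs.foldl (fun d q => d.modify q.1 [] (fun v => v ++ [q.2])) PySem.Dict.empty with hD
  have hnd : D.keys.Nodup := by
    rw [hD]
    exact PySem.Dict.nodup_keys_foldl_modify_key pairs (fun q => q.1) [] _ _ (by simp)
  have hkeys : D.keys = PySem.List.dedup (pairs.map (fun q => q.1)) := by
    rw [hD]
    have := PySem.Dict.keys_foldl_modify_key (l := pairs) (key := fun q => q.1)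
      (d0 := []) (f := fun d q => fun v => v ++ [q.2]) (d := PySem.Dict.empty)
    simpa [PySem.List.dedup_eq_ofList, PySem.Set.ofList_eq_foldl, PySem.Set.update] using this
  rw [PySem.Dict.items_eq_map_keys D hnd [], hkeys]
  refine List.map_congr_left (fun k _ => ?_)
  have := PySem.Dict.getD_foldl_modify_append (l := pairs) (d := PySem.Dict.empty) (c := k)
  simp only [hD, this, PySem.Dict.getD_empty, List.nil_append]
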